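-- pv_equiv track=rewrite | github.com/bioinformatics-torvergata/RIG | scripts/compute_entropy.py | removeGapsFromAlign
-- ===== SOURCE A (Python) =====
-- def removeGapsFromAlign(sscons, align, gapCharacter="."):
--     """
--     removes positions from the alignment that match gaps in the sscons
--     input:
--         sscons in WUSS format
--         alignment as string array
--     output:
--         modified alignment
--     """
--
--     assert len(sscons) == len(align[0]), "different lengths!\n sscons w gaps:{}, align:{}".format(
--         (len(sscons)), len(align[0])
--     )
--
--     cleanAlign = ["".join([a for ss, a in zip(sscons, seq) if ss != gapCharacter]) for seq in align]
--     if (len(sscons) - sscons.count(gapCharacter)) != len(cleanAlign[0]):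
--         raise ValueError('gaps removal error!')
--
--     return cleanAlign
-- ===== SOURCE B (Python) =====
-- def removeGapsFromAlign(sscons, align, gapCharacter="."):
--     """
--     removes positions from the alignment that match gaps in the sscons
--     (run-length decomposition: gap-free column runs are copied with slices)
--     """
--     assert len(sscons) == len(align[0]), "different lengths!\n sscons w gaps:{}, align:{}".format(
--         (len(sscons)), len(align[0])
--     )
--
--     runs = []
--     start = None
--     for i, ss in enumerate(sscons):
--         if ss != gapCharacter:
--             if start is None:
--                 start = i
--         elif start is not None:
--             runs.append((start, i))
--             start = None
--     if start is not None:
--         runs.append((start, len(sscons)))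
--
--     cleanAlign = ["".join(seq[s:e] for s, e in runs) for seq in align]
--     if (len(sscons) - sscons.count(gapCharacter)) != len(cleanAlign[0]):
--         raise ValueError('gaps removal error!')
--
--     return cleanAlign
-- ===== Notes on version B (the rewrite author's own statement) =====
-- stated objective: alternative
-- what changed: Instead of re-zipping sscons with every sequence and filtering character by character, B makes one pass over sscons to build the list of gap-free column runs (start,end) and then copies each run of every row with a single slice.
import Mathlib
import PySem

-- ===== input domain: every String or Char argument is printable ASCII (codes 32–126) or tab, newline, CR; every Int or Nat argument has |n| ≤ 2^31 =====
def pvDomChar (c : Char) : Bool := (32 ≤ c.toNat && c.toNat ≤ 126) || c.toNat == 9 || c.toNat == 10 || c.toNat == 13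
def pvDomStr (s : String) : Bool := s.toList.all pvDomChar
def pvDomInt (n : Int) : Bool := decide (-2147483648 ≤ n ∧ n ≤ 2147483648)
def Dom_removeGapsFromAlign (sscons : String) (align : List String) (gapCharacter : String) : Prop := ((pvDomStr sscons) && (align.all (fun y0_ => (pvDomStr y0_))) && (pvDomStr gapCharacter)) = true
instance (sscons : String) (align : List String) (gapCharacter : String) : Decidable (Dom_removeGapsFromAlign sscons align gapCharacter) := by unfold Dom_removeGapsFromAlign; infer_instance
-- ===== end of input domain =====

-- B replaces the per-sequence re-zip of sscons with a one-pass run-length decomposition of the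
-- gap-free column runs, then copies each run of every row with one slice (alternative algorithm,
-- return value identical).  Equivalence is about return values; exceptional inputs are outside Pre_.

-- ===== PORT A =====
-- cleanAlign = ["".join([a for ss, a in zip(sscons, seq) if ss != gapCharacter]) for seq in align]
def removeGapsFromAlign (sscons : String) (align : List String) (gapCharacter : String) : List String :=
  align.map (fun seq =>
    String.ofList ((((sscons.toList).zip seq.toList).filter
      (fun p => String.ofList [p.1] != gapCharacter)).map (fun p => p.2)))

-- ===== PORT B =====
-- the `for i, ss in enumerate(sscons)` loop of Source B: state = (current index, open run start)
def pvRuns (gapCharacter : String) : List Char → Nat → Option Nat → List (Nat × Nat)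
  | [], _, none => []
  | [], i, some s => [(s, i)]
  | c :: cs, i, st =>
    if String.ofList [c] != gapCharacter then
      pvRuns gapCharacter cs (i + 1) (match st with | none => some i | some s => some s)
    else
      match st with
      | none => pvRuns gapCharacter cs (i + 1) none
      | some s => (s, i) :: pvRuns gapCharacter cs (i + 1) none

-- cleanAlign = ["".join(seq[s:e] for s, e in runs) for seq in align]
def removeGapsFromAlign_alt (sscons : String) (align : List String) (gapCharacter : String) : List String :=
  let runs := pvRuns gapCharacter sscons.toList 0 none
  align.map (fun seq =>
    String.ofList ((runs.map (fun r =>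
      PySem.List.slice seq.toList (some ((r.1 : Int))) (some ((r.2 : Int))))).flatten))

-- ===== PRECONDITION & SPEC =====
-- Pre_ excludes exactly the inputs where Python A raises: empty align (IndexError on align[0]),
-- len(sscons) ≠ len(align[0]) (AssertionError), and a gapCharacter that is not a single character
-- yet occurs in sscons as a substring (then the final length check raises ValueError).
def Pre_removeGapsFromAlign (sscons : String) (align : List String) (gapCharacter : String) : Prop :=
  align ≠ [] ∧ sscons.toList.length = (align.headD "").toList.length ∧
    (gapCharacter.toList.length = 1 ∨ PySem.Str.count sscons gapCharacter = 0)
instance (sscons : String) (align : List String) (gapCharacter : String) : Decidable (Pre_removeGapsFromAlign sscons align gapCharacter) := by unfold Pre_removeGapsFromAlign; infer_instance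

def pvWitness_removeGapsFromAlign : String × List String × String := ("a.b.", ["ag.c", "x.y."], ".")

def Spec_removeGapsFromAlign (sscons : String) (align : List String) (gapCharacter : String) (out : List String) : Prop := out = removeGapsFromAlign_alt sscons align gapCharacter
instance (sscons : String) (align : List String) (gapCharacter : String) (out : List String) : Decidable (Spec_removeGapsFromAlign sscons align gapCharacter out) := by unfold Spec_removeGapsFromAlign; infer_instance

-- ===== CLAIM (what is proved, stated in full; the proofs are below) =====
def Claim_equal_removeGapsFromAlign : Prop := ∀ (sscons : String) (align : List String) (gapCharacter : String), Dom_removeGapsFromAlign sscons align gapCharacter → Pre_removeGapsFromAlign sscons align gapCharacter → Spec_removeGapsFromAlign sscons align gapCharacter (removeGapsFromAlign sscons align gapCharacter)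

-- ===== LEMMAS AND PROOFS =====

-- the filtered row A builds, as a list function
def pvRow (gap : String) (ss seq : List Char) : List Char :=
  ((ss.zip seq).filter (fun p => String.ofList [p.1] != gap)).map (fun p => p.2)

theorem pvRuns_flatten (gap : String) (cs : List Char) : ∀ (i : Nat) (st : Option Nat) (seq : List Char),
    (∀ s, st = some s → s ≤ i) →
    ((pvRuns gap cs i st).map (fun r => (seq.drop r.1).take (r.2 - r.1))).flatten
      = (match st with
         | some s => (seq.drop s).take (i - s)
         | none => ([] : List Char)) ++ pvRow gap cs (seq.drop i) := by
  induction cs with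
  | nil =>
    intro i st seq _
    cases st <;> simp [pvRuns, pvRow]
  | cons c cs ih =>
    intro i st seq hst
    by_cases hc : (String.ofList [c] != gap) = true
    · cases st with
      | none =>
        have := ih (i + 1) (some i) seq (by intro s hs; cases hs; omega)
        rw [pvRuns, if_pos hc, this]
        cases hdi : seq.drop i with
        | nil =>
          have h1 : seq.drop (i + 1) = [] :=
            List.drop_eq_nil_iff.mpr (by have := List.drop_eq_nil_iff.mp hdi; omega)
          simp [pvRow, hdi, h1]
        | cons x t =>
          have h1 : seq.drop (i + 1) = t := by
            rw [← List.tail_drop, hdi]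
            rfl
          simp [pvRow, hdi, h1, hc]
      | some s =>
        have hs : s ≤ i := hst s rfl
        have := ih (i + 1) (some s) seq (by intro s' hs'; cases hs'; omega)
        rw [pvRuns, if_pos hc, this]
        cases hdi : seq.drop i with
        | nil =>
          have hlen : seq.length ≤ i := by
            have := List.drop_eq_nil_iff.mp hdi; omega
          have h1 : seq.drop (i + 1) = [] := List.drop_eq_nil_iff.mpr (by omega)
          have h2 : (seq.drop s).take (i + 1 - s) = (seq.drop s).take (i - s) := by
            rw [List.take_of_length_le (by simp; omega), List.take_of_length_le (by simp; omega)]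
          simp [pvRow, h1, h2]
        | cons x t =>
          have h1 : seq.drop (i + 1) = t := by
            rw [← List.tail_drop, hdi]
            rfl
          have hx : seq[i]? = some x := by
            rw [← Nat.add_zero i, ← List.getElem?_drop, hdi]
            rfl
          have h2 : (seq.drop s).take (i + 1 - s) = (seq.drop s).take (i - s) ++ [x] := by
            have hsucc : i + 1 - s = (i - s) + 1 := by omega
            rw [hsucc, List.take_add_one]
            have : (seq.drop s)[i - s]? = some x := by
              rw [List.getElem?_drop]
              have : s + (i - s) = i := by omega
              rw [this, hx]
            simp [this]
          simp [pvRow, h1, hc, h2]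
    · simp only [Bool.not_eq_true] at hc
      cases st with
      | none =>
        have := ih (i + 1) none seq (by intro s hs; cases hs)
        rw [pvRuns, if_neg (by simp [hc]), this]
        cases hdi : seq.drop i with
        | nil =>
          have h1 : seq.drop (i + 1) = [] :=
            List.drop_eq_nil_iff.mpr (by have := List.drop_eq_nil_iff.mp hdi; omega)
          simp [pvRow, hdi, h1]
        | cons x t =>
          have h1 : seq.drop (i + 1) = t := by
            rw [← List.tail_drop, hdi]
            rfl
          simp [pvRow, hdi, h1, hc]
      | some s =>
        have hs : s ≤ i := hst s rfl
        have := ih (i + 1) none seq (by intro s hs'; cases hs')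
        rw [pvRuns, if_neg (by simp [hc]), List.map_cons, List.flatten_cons, this]
        cases hdi : seq.drop i with
        | nil =>
          have h1 : seq.drop (i + 1) = [] :=
            List.drop_eq_nil_iff.mpr (by have := List.drop_eq_nil_iff.mp hdi; omega)
          simp [pvRow, hdi, h1]
        | cons x t =>
          have h1 : seq.drop (i + 1) = t := by
            rw [← List.tail_drop, hdi]
            rfl
          simp [pvRow, hdi, h1, hc]

theorem pvRuns_row (gap : String) (ss seq : List Char) :
    ((pvRuns gap ss 0 none).map (fun r => (seq.drop r.1).take (r.2 - r.1))).flatten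
      = pvRow gap ss seq := by
  have := pvRuns_flatten gap ss 0 none seq (by intro s hs; cases hs)
  simpa using this

-- ===== VERDICT (by name: the statement is the Claim_ definition above) =====
theorem removeGapsFromAlign_spec : Claim_equal_removeGapsFromAlign := by
  intro sscons align gapCharacter _ _
  unfold Spec_removeGapsFromAlign removeGapsFromAlign removeGapsFromAlign_alt
  apply List.map_congr_left
  intro seq _
  congr 1
  show pvRow gapCharacter sscons.toList seq.toList = _
  rw [← pvRuns_row gapCharacter sscons.toList seq.toList]
  congr 1
  apply List.map_congr_left
  intro r _
  rw [PySem.List.slice_natCast]
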